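-- pv_equiv track=rewrite | github.com/miliar/Code_Jam_Webscraper | solutions_python/solutions_year17_round0_nr2/2871.py | decr
-- ===== SOURCE A (Python) =====
-- def decr(s,i):
--     if i<0:
--         return s
--     tmp=int(s[i])
--     if tmp==0:
--         s=s[:i]+"9"+s[i+1:]
--         return decr(s,i-1)
--     else:
--         s=s[:i]+str(tmp-1)+s[i+1:]
--         return s
-- ===== SOURCE B (Python) =====
-- def decr(s, i):
--     if i < 0:
--         return s
--     j = i
--     while j >= 0 and s[j] == '0':
--         j -= 1
--     nines = '9' * (i - j)
--     if j < 0: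
--         return nines + s[i + 1:]
--     return s[:j] + str(int(s[j]) - 1) + nines + s[i + 1:]
-- ===== Notes on version B (the rewrite author's own statement) =====
-- stated objective: alternative
-- what changed: A rebuilds the whole string by slicing on every recursive borrow step; B first scans an index past the run of '0's with a while loop, then builds the result with a single concatenation of prefix, decremented digit, a block of '9's and the unchanged suffix.
import Mathlib
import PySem

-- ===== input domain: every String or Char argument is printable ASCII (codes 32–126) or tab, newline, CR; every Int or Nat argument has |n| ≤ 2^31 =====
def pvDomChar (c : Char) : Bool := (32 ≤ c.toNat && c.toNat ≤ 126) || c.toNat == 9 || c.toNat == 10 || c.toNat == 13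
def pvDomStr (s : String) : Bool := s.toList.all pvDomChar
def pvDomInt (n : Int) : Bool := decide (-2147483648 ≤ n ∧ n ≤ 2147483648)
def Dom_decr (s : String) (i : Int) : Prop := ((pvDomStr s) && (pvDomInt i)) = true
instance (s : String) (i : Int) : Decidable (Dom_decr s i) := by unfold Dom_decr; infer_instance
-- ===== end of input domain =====

-- B replaces A's per-step string-rebuilding recursion by a single scan past the zero run
-- followed by one concatenation (objective: alternative decomposition, same results).


-- ===== PORT A =====
-- A over the code points: if i<0 return s; tmp=int(s[i]); if tmp==0 set that slot to '9'
-- and recurse with i-1; else set it to str(tmp-1) and return.  (String ops are on List Char;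
-- int(s[i]) is PySem.Int.ofChars? on the one-char string, total under Pre_decr.)
def decrA (cs : List Char) (i : Int) : List Char :=
  if i < 0 then cs
  else
    let tmp := (PySem.Int.ofChars? [PySem.List.pyGetD cs i ' ']).getD 0
    if tmp = 0 then
      decrA (PySem.List.slice cs none (some i) ++ ['9'] ++ PySem.List.slice cs (some (i + 1)) none) (i - 1)
    else
      PySem.List.slice cs none (some i) ++ PySem.Int.toChars (tmp - 1) ++ PySem.List.slice cs (some (i + 1)) none
termination_by (i + 1).toNat
decreasing_by omega

def decr (s : String) (i : Int) : String := String.ofList (decrA s.toList i)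

-- ===== PORT B =====
-- the while loop 'while j >= 0 and s[j] == '0': j -= 1'
def skipZeros (cs : List Char) (j : Int) : Int :=
  if j < 0 then j
  else if PySem.List.pyGetD cs j ' ' = '0' then skipZeros cs (j - 1) else j
termination_by (j + 1).toNat
decreasing_by omega

def altCore (cs : List Char) (i : Int) : List Char :=
  let j := skipZeros cs i
  let nines := List.replicate (i - j).toNat '9'   -- '9' * (i - j)
  if j < 0 then nines ++ PySem.List.slice cs (some (i + 1)) none
  else
    PySem.List.slice cs none (some j)
      ++ PySem.Int.toChars ((PySem.Int.ofChars? [PySem.List.pyGetD cs j ' ']).getD 0 - 1)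
      ++ nines ++ PySem.List.slice cs (some (i + 1)) none

def decr_alt (s : String) (i : Int) : String :=
  if i < 0 then s else String.ofList (altCore s.toList i)

-- ===== PRECONDITION & SPEC =====
-- Pre_ excludes exactly the inputs where A raises: i beyond the end (IndexError) and the
-- inputs whose borrow walk from i hits a non-digit character (ValueError from int()).
def Pre_decr (s : String) (i : Int) : Prop :=
  i < (s.toList.length : Int) ∧
  ∀ j < s.toList.length, (j : Int) ≤ i →
    (∀ k < s.toList.length, j < k → (k : Int) ≤ i → s.toList.getD k ' ' = '0') →
    (s.toList.getD j ' ').isDigit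
instance (s : String) (i : Int) : Decidable (Pre_decr s i) := by unfold Pre_decr; infer_instance

def pvWitness_decr : String × Int := ("1300", 3)

def Spec_decr (s : String) (i : Int) (out : String) : Prop := out = decr_alt s i
instance (s : String) (i : Int) (out : String) : Decidable (Spec_decr s i out) := by unfold Spec_decr; infer_instance

-- ===== CLAIM (what is proved, stated in full; the proofs are below) =====
def Claim_equal_decr : Prop := ∀ (s : String) (i : Int), Dom_decr s i → Pre_decr s i → Spec_decr s i (decr s i)

-- ===== LEMMAS AND PROOFS =====

lemma ofCharsDigit (c : Char) (h : c.isDigit = true) :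
    ((PySem.Int.ofChars? [c]).getD 0 = 0 ↔ c = '0') := by
  have h1 : 48 ≤ c.toNat ∧ c.toNat ≤ 57 := by simp [Char.isDigit] at h; exact h
  obtain ⟨d, hd, he⟩ : ∃ d, d < 10 ∧ c.toNat = 48 + d := ⟨c.toNat - 48, by omega, by omega⟩
  have hc : c = Char.ofNat (48 + d) := by rw [← he]; exact (Char.ofNat_toNat c).symm
  subst hc
  interval_cases d <;> decide

lemma skipZeros_le (cs : List Char) (j : Int) : skipZeros cs j ≤ j := by
  fun_induction skipZeros cs j with
  | case1 => omega
  | case2 _ _ _ ih => omega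
  | case3 => omega

lemma skipZeros_neg_one_le (cs : List Char) (j : Int) (h : -1 ≤ j) : -1 ≤ skipZeros cs j := by
  fun_induction skipZeros cs j with
  | case1 => omega
  | case2 _ _ _ ih => exact ih (by omega)
  | case3 => omega

lemma skipZeros_congr (cs cs' : List Char) (j : Int)
    (h : ∀ k : Nat, (k : Int) ≤ j → cs.getD k ' ' = cs'.getD k ' ') :
    skipZeros cs j = skipZeros cs' j := by
  fun_induction skipZeros cs j with
  | case1 j hj => conv_rhs => rw [skipZeros, if_pos hj]
  | case2 j hj hz ih =>
    have hjn : ((j.toNat : Nat) : Int) = j := by omega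
    have hz' : cs.getD j.toNat ' ' = '0' := by
      rw [← hjn, PySem.List.pyGetD_natCast] at hz; simpa using hz
    have hcc := h j.toNat (by omega)
    conv_rhs => rw [skipZeros]
    rw [if_neg hj, if_pos (by rw [← hjn, PySem.List.pyGetD_natCast]; exact hcc.symm.trans hz')]
    exact ih (fun k hk => h k (by omega))
  | case3 j hj hz =>
    have hjn : ((j.toNat : Nat) : Int) = j := by omega
    have hz' : ¬ cs.getD j.toNat ' ' = '0' := by
      rw [← hjn, PySem.List.pyGetD_natCast] at hz; simpa using hz
    have hcc := h j.toNat (by omega)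
    conv_rhs => rw [skipZeros]
    rw [if_neg hj, if_neg (by rw [← hjn, PySem.List.pyGetD_natCast]; exact fun he => hz' (hcc.trans he))]

lemma cast_succ (n : Nat) : ((n : Int) + 1) = (((n + 1 : Nat) : Nat) : Int) := by push_cast; ring

lemma nines_cons (k : Nat) (rest : List Char) :
    List.replicate k '9' ++ '9' :: rest = List.replicate (k + 1) '9' ++ rest := by
  rw [List.append_cons, ← List.replicate_succ']

-- the branch where s[i] is a nonzero digit: both sides return at once
lemma nonzero_case (n : Nat) (cs : List Char) (_hn : n < cs.length)
    (hdig : (cs.getD n ' ').isDigit = true) (hz : cs.getD n ' ' ≠ '0') :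
    decrA cs (n : Int) = altCore cs (n : Int) := by
  have htmp : ¬ (PySem.Int.ofChars? [PySem.List.pyGetD cs (n : Int) ' ']).getD 0 = 0 := by
    rw [PySem.List.pyGetD_natCast]
    exact fun h => hz ((ofCharsDigit _ hdig).mp h)
  have hsz : skipZeros cs (n : Int) = (n : Int) := by
    rw [skipZeros, if_neg (by omega), if_neg (by rw [PySem.List.pyGetD_natCast]; exact fun h => hz h)]
  rw [decrA, if_neg (by omega), if_neg htmp, altCore]
  simp only [hsz, sub_self, Int.toNat_zero, List.replicate_zero, if_neg (show ¬ (n : Int) < 0 by omega)]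
  simp [List.append_assoc]

lemma key (n : Nat) : ∀ cs : List Char, n < cs.length →
    (∀ j < cs.length, (j : Int) ≤ (n : Int) →
      (∀ k < cs.length, j < k → (k : Int) ≤ (n : Int) → cs.getD k ' ' = '0') →
      (cs.getD j ' ').isDigit) →
    decrA cs (n : Int) = altCore cs (n : Int) := by
  induction n with
  | zero =>
    intro cs hlen hpre
    have hdig : (cs.getD 0 ' ').isDigit = true :=
      hpre 0 hlen (by omega) (fun k _ hk1 hk2 => by omega)
    by_cases hz : cs.getD 0 ' ' = '0'
    · -- s[0] == '0' : A sets it to '9' and recursion stops at i = -1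
      have htmp : (PySem.Int.ofChars? [PySem.List.pyGetD cs (((0 : Nat) : Nat) : Int) ' ']).getD 0 = 0 := by
        rw [PySem.List.pyGetD_natCast]
        exact (ofCharsDigit _ hdig).mpr hz
      have hsz : skipZeros cs (((0 : Nat) : Nat) : Int) = -1 := by
        rw [skipZeros, if_neg (by omega),
          if_pos (by rw [PySem.List.pyGetD_natCast]; exact hz)]
        rw [skipZeros, if_pos (by omega)]
        omega
      rw [decrA, if_neg (by omega), if_pos htmp, decrA, if_pos (by omega), altCore]
      simp only [hsz, if_pos (show (-1 : Int) < 0 by omega)]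
      norm_num [PySem.List.slice_to cs (le_refl (0 : Int))]
    · exact nonzero_case 0 cs hlen hdig hz
  | succ m ih =>
    intro cs hlen hpre
    set n : Nat := m + 1 with hn
    have hdig : (cs.getD n ' ').isDigit = true :=
      hpre n hlen (by omega) (fun k _ hk1 hk2 => by omega)
    by_cases hz : cs.getD n ' ' = '0'
    · -- borrow step: A recurses on cs' = cs[:n] ++ "9" ++ cs[n+1:] with index n-1 = m
      set cs' : List Char := cs.take n ++ '9' :: cs.drop (n + 1) with hcs'
      have hlto : (cs.take n).length = n := by simp [List.length_take]; omega
      have hlt : cs'.length = cs.length := by simp [hcs', List.length_take, List.length_drop]; omega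
      -- cs' agrees with cs strictly below n, and cs'[n:] = '9' :: cs[n+1:]
      have hag : ∀ k : Nat, k < n → cs'.getD k ' ' = cs.getD k ' ' := by
        intro k hk
        simp only [hcs', List.getD]
        rw [List.getElem?_append_left (by omega), List.getElem?_take_of_lt hk]
      have hdropm : cs'.drop (m + 1) = '9' :: cs.drop (n + 1) := by
        have h9 : (cs.take n ++ '9' :: cs.drop (n + 1)).drop (cs.take n).length
            = '9' :: cs.drop (n + 1) := List.drop_left
        rw [hlto] at h9
        exact h9
      have htakej : ∀ k : Nat, k ≤ m → cs'.take k = cs.take k := by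
        intro k hk
        rw [hcs', List.take_append_of_le_length (by omega), List.take_take,
          min_eq_left (by omega)]
      have hidx : ((n : Nat) : Int) - 1 = ((m : Nat) : Int) := by push_cast [hn]; ring
      -- the int(s[i]) == 0 test fires
      have htmp : (PySem.Int.ofChars? [PySem.List.pyGetD cs ((n : Nat) : Int) ' ']).getD 0 = 0 := by
        rw [PySem.List.pyGetD_natCast]
        exact (ofCharsDigit _ hdig).mpr hz
      -- A's next call is decrA cs' m
      have hstep : decrA cs ((n : Nat) : Int) = decrA cs' ((m : Nat) : Int) := by
        rw [decrA, if_neg (by omega), if_pos htmp, hidx,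
          PySem.List.slice_to_natCast, cast_succ n, PySem.List.slice_from_natCast]
        simp [hcs', List.append_assoc]
      -- precondition transfers to cs'
      have hpre' : ∀ j < cs'.length, (j : Int) ≤ (m : Int) →
          (∀ k < cs'.length, j < k → (k : Int) ≤ (m : Int) → cs'.getD k ' ' = '0') →
          (cs'.getD j ' ').isDigit := by
        intro j hj hjle hall
        rw [hag j (by omega)]
        refine hpre j (by omega) (by omega) ?_
        intro k hk hk1 hk2
        by_cases hkm : k ≤ m
        · rw [← hag k (by omega)]; exact hall k (by omega) hk1 (by exact_mod_cast hkm)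
        · have : k = n := by omega
          rw [this]; exact hz
      have hIH : decrA cs' ((m : Nat) : Int) = altCore cs' ((m : Nat) : Int) :=
        ih cs' (by omega) hpre'
      -- skipZeros walks through the '0' at n, and sees the same characters in cs and cs'
      have hszs : skipZeros cs ((n : Nat) : Int) = skipZeros cs ((m : Nat) : Int) := by
        rw [skipZeros, if_neg (by omega),
          if_pos (by rw [PySem.List.pyGetD_natCast]; exact hz), hidx]
      have hszc : skipZeros cs' ((m : Nat) : Int) = skipZeros cs ((m : Nat) : Int) :=
        skipZeros_congr cs' cs _ (fun k hk => (hag k (by omega)).symm ▸ rfl)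
      set j : Int := skipZeros cs ((m : Nat) : Int) with hj
      have hjle : j ≤ (m : Int) := skipZeros_le cs _
      have hjge : (-1 : Int) ≤ j := skipZeros_neg_one_le cs _ (by omega)
      -- now both altCore expressions coincide
      rw [hstep, hIH, altCore, altCore]
      simp only [hszs, hszc]
      by_cases hjneg : j < 0
      · rw [if_pos hjneg, if_pos hjneg]
        rw [cast_succ m, PySem.List.slice_from_natCast, cast_succ n,
          PySem.List.slice_from_natCast, hdropm, nines_cons,
          show ((m : Int) - j).toNat + 1 = ((n : Int) - j).toNat from by omega]
      · rw [if_neg hjneg, if_neg hjneg]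
        have hjn : ((j.toNat : Nat) : Int) = j := by omega
        rw [cast_succ m, PySem.List.slice_from_natCast, cast_succ n,
          PySem.List.slice_from_natCast, hdropm,
          ← hjn, PySem.List.slice_to_natCast, PySem.List.slice_to_natCast,
          PySem.List.pyGetD_natCast, PySem.List.pyGetD_natCast,
          htakej j.toNat (by omega), hag j.toNat (by omega)]
        simp only [List.append_assoc, nines_cons]
        rw [show ((m : Int) - (j.toNat : Int)).toNat + 1 = ((n : Int) - (j.toNat : Int)).toNat from by omega]
    · exact nonzero_case n cs hlen hdig hz

-- ===== VERDICT (by name: the statement is the Claim_ definition above) =====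
theorem decr_spec : Claim_equal_decr := by
  intro s i _ hpre
  unfold Spec_decr decr decr_alt
  by_cases hi : i < 0
  · rw [decrA, if_pos hi, if_pos hi, String.ofList_toList]
  · rw [if_neg hi]
    have hin : i = ((i.toNat : Nat) : Int) := by omega
    rw [hin]
    exact congrArg String.ofList
      (key i.toNat s.toList (by have := hpre.1; omega) (by rw [← hin]; exact hpre.2))
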